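-- pv_equiv track=rewrite | github.com/DonghunLEE-CEE/CTM_PROJECT | src/ctm/network.py | detector_indices
-- ===== SOURCE A (Python) =====
-- from typing import Iterable, List
--
-- def detector_indices(
--     n_cells: int,
--     off_ramp_cells: Iterable[int],
--     on_ramp_cells: Iterable[int],
-- ) -> tuple[int, ...]:
--     """
--     검지기 위치: 구간 양끝 + 모든 on/off 램프 셀 (중복 제거, 정렬).
--     시뮬 로직과 무관하게 도식용 기본 배치.
--     """
--     if n_cells <= 0:
--         return ()
--     s: set[int] = {0, n_cells - 1}
--     s.update(int(i) for i in off_ramp_cells)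
--     s.update(int(i) for i in on_ramp_cells)
--     s = {i for i in s if 0 <= i < n_cells}
--     return tuple(sorted(s))
-- ===== SOURCE B (Python) =====
-- def _insert_sorted_unique(out, c):
--     """Insert c into the strictly sorted list out, keeping it sorted and duplicate-free."""
--     for k, v in enumerate(out):
--         if v == c:
--             return
--         if v > c:
--             out.insert(k, c)
--             return
--     out.append(c)
--
--
-- def detector_indices(n_cells, off_ramp_cells, on_ramp_cells):
--     if n_cells <= 0:
--         return ()
--     out = []
--     _insert_sorted_unique(out, 0)
--     _insert_sorted_unique(out, n_cells - 1)
--     for src in (off_ramp_cells, on_ramp_cells):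
--         for i in src:
--             c = int(i)
--             if 0 <= c < n_cells:
--                 _insert_sorted_unique(out, c)
--     return tuple(out)
-- ===== Notes on version B (the rewrite author's own statement) =====
-- stated objective: alternative
-- what changed: A collects candidates into a hash set, filters with a set comprehension and finally sorts; B never builds a set and never calls sort: it maintains a strictly sorted, duplicate-free output list as a loop invariant, inserting each in-range candidate at its ordered position (online insertion with dedup-on-insert), so order and uniqueness hold at every step instead of being established afterwards.
import Mathlib
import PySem

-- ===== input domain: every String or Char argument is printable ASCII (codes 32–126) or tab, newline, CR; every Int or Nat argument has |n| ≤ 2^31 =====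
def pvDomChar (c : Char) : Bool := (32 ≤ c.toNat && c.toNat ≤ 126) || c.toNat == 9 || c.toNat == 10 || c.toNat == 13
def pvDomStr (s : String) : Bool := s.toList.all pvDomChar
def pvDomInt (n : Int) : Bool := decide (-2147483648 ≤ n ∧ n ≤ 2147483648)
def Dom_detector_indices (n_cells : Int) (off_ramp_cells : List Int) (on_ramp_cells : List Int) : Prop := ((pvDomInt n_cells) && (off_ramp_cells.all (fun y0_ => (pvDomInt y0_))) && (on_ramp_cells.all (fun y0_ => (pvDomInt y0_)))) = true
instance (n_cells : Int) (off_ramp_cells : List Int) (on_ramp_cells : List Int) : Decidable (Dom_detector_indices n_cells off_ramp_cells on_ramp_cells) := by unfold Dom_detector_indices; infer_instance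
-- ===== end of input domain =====

-- B replaces A's hash-set collection + final sort by online insertion into an always strictly
-- sorted, duplicate-free list (dedup-on-insert, no set, no sort call); objective: alternative.


-- ===== PORT A =====
def detector_indices (n_cells : Int) (off_ramp_cells : List Int) (on_ramp_cells : List Int) : List Int :=
  if n_cells ≤ 0 then []
  else
    -- s = {0, n_cells - 1}
    let s : PySem.Set Int := PySem.Set.ofList [0, n_cells - 1]
    -- s.update(int(i) for i in off_ramp_cells)   (int(i) is the identity on int)
    let s := PySem.Set.update s off_ramp_cells
    -- s.update(int(i) for i in on_ramp_cells)
    let s := PySem.Set.update s on_ramp_cells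
    -- s = {i for i in s if 0 <= i < n_cells}
    let s : PySem.Set Int := PySem.Set.ofList (s.filter (fun i => decide (0 ≤ i ∧ i < n_cells)))
    -- tuple(sorted(s))
    PySem.List.sorted s (fun x => x) false

-- ===== PORT B =====
-- Source B's _insert_sorted_unique: scan for the place of c; equal → unchanged, greater → insert
-- before it, end of list → append
def insertSortedUnique (out : List Int) (c : Int) : List Int :=
  match out with
  | [] => [c]
  | v :: t =>
      if v = c then v :: t
      else if v > c then c :: v :: t
      else v :: insertSortedUnique t c

-- the inner 'for i in src: c = int(i); if 0 <= c < n_cells: _insert_sorted_unique(out, c)' loop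
def insertRamp (n_cells : Int) (src : List Int) (out : List Int) : List Int :=
  src.foldl (fun acc c => if 0 ≤ c ∧ c < n_cells then insertSortedUnique acc c else acc) out

def detector_indices_alt (n_cells : Int) (off_ramp_cells : List Int) (on_ramp_cells : List Int) : List Int :=
  if n_cells ≤ 0 then []
  else
    let out : List Int := []
    let out := insertSortedUnique out 0
    let out := insertSortedUnique out (n_cells - 1)
    -- for src in (off_ramp_cells, on_ramp_cells): …
    let out := insertRamp n_cells off_ramp_cells out
    let out := insertRamp n_cells on_ramp_cells out
    out

-- ===== PRECONDITION & SPEC =====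
def Spec_detector_indices (n_cells : Int) (off_ramp_cells : List Int) (on_ramp_cells : List Int) (out : List Int) : Prop := out = detector_indices_alt n_cells off_ramp_cells on_ramp_cells
instance (n_cells : Int) (off_ramp_cells : List Int) (on_ramp_cells : List Int) (out : List Int) : Decidable (Spec_detector_indices n_cells off_ramp_cells on_ramp_cells out) := by unfold Spec_detector_indices; infer_instance

-- ===== CLAIM (what is proved, stated in full; the proofs are below) =====
def Claim_equal_detector_indices : Prop := ∀ (n_cells : Int) (off_ramp_cells : List Int) (on_ramp_cells : List Int), Dom_detector_indices n_cells off_ramp_cells on_ramp_cells → Spec_detector_indices n_cells off_ramp_cells on_ramp_cells (detector_indices n_cells off_ramp_cells on_ramp_cells)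

-- ===== LEMMAS AND PROOFS =====

-- insertion preserves strict sortedness and adds exactly c to the members
theorem insertSortedUnique_props (l : List Int) (c : Int) (hl : l.Pairwise (· < ·)) :
    (insertSortedUnique l c).Pairwise (· < ·)
      ∧ (∀ x, x ∈ insertSortedUnique l c ↔ x ∈ l ∨ x = c) := by
  induction l with
  | nil => simp [insertSortedUnique]
  | cons v t ih =>
      rw [List.pairwise_cons] at hl
      obtain ⟨hvt, ht⟩ := hl
      by_cases hvc : v = c
      · subst hvc
        have he : insertSortedUnique (v :: t) v = v :: t := by
          simp [insertSortedUnique]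
        rw [he]
        refine ⟨List.pairwise_cons.mpr ⟨hvt, ht⟩, ?_⟩
        intro x; simp only [List.mem_cons]; tauto
      · simp only [insertSortedUnique, if_neg hvc]
        by_cases hgt : v > c
        · simp only [if_pos hgt]
          refine ⟨?_, ?_⟩
          · refine List.pairwise_cons.mpr ⟨?_, List.pairwise_cons.mpr ⟨hvt, ht⟩⟩
            intro x hx
            rcases List.mem_cons.mp hx with rfl | hx
            · exact hgt
            · exact lt_trans hgt (hvt x hx)
          · intro x; simp only [List.mem_cons]; tauto
        · simp only [if_neg hgt]
          obtain ⟨ipw, imem⟩ := ih ht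
          have hvc' : v < c := by omega
          refine ⟨?_, ?_⟩
          · refine List.pairwise_cons.mpr ⟨?_, ipw⟩
            intro x hx
            rcases (imem x).mp hx with hx | rfl
            · exact hvt x hx
            · exact hvc'
          · intro x; simp only [List.mem_cons, imem x]; tauto

theorem insertRamp_props (n : Int) (src : List Int) (out : List Int)
    (hout : out.Pairwise (· < ·)) :
    (insertRamp n src out).Pairwise (· < ·)
      ∧ (∀ x, x ∈ insertRamp n src out ↔ x ∈ out ∨ (x ∈ src ∧ 0 ≤ x ∧ x < n)) := by
  induction src generalizing out with
  | nil => exact ⟨hout, by simp [insertRamp]⟩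
  | cons c l ih =>
      simp only [insertRamp, List.foldl_cons] at *
      split_ifs with h
      · obtain ⟨ipw, imem⟩ := insertSortedUnique_props out c hout
        obtain ⟨pw, mem⟩ := ih _ ipw
        refine ⟨pw, ?_⟩
        intro x
        rw [mem x, imem x]
        simp only [List.mem_cons]
        constructor
        · rintro ((hx | rfl) | hx)
          · exact Or.inl hx
          · exact Or.inr ⟨Or.inl rfl, h⟩
          · exact Or.inr ⟨Or.inr hx.1, hx.2⟩
        · rintro (hx | ⟨(rfl | hx), hr⟩)
          · exact Or.inl (Or.inl hx)
          · exact Or.inl (Or.inr rfl)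
          · exact Or.inr ⟨hx, hr⟩
      · obtain ⟨pw, mem⟩ := ih _ hout
        refine ⟨pw, ?_⟩
        intro x
        rw [mem x]
        simp only [List.mem_cons]
        constructor
        · rintro (hx | hx)
          · exact Or.inl hx
          · exact Or.inr ⟨Or.inr hx.1, hx.2⟩
        · rintro (hx | ⟨(rfl | hx), hr⟩)
          · exact Or.inl hx
          · exact absurd hr h
          · exact Or.inr ⟨hx, hr⟩

-- ===== VERDICT (by name: the statement is the Claim_ definition above) =====
theorem detector_indices_spec : Claim_equal_detector_indices := by
  intro n off on _
  unfold Spec_detector_indices detector_indices detector_indices_alt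
  by_cases hn : n ≤ 0
  · simp [hn]
  · simp only [hn, if_false]
    have hnpos : 0 < n := by omega
    -- B's result: strictly sorted, with the intended membership
    obtain ⟨pw0, mem0⟩ := insertSortedUnique_props [] 0 (by simp)
    obtain ⟨pw1, mem1⟩ := insertSortedUnique_props _ (n - 1) pw0
    obtain ⟨pw2, mem2⟩ := insertRamp_props n off _ pw1
    obtain ⟨pw3, mem3⟩ := insertRamp_props n on _ pw2
    set resB : List Int := insertRamp n on (insertRamp n off
      (insertSortedUnique (insertSortedUnique [] 0) (n - 1))) with hrB
    have hmemB : ∀ x : Int, x ∈ resB ↔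
        (0 ≤ x ∧ x < n ∧ (x = 0 ∨ x = n - 1 ∨ x ∈ off ∨ x ∈ on)) := by
      intro x
      rw [hrB, mem3 x, mem2 x, mem1 x, mem0 x]
      simp only [List.not_mem_nil, false_or]
      constructor
      · rintro (((rfl | rfl) | hx) | hx)
        · exact ⟨le_refl 0, hnpos, Or.inl rfl⟩
        · exact ⟨by omega, by omega, Or.inr (Or.inl rfl)⟩
        · exact ⟨hx.2.1, hx.2.2, Or.inr (Or.inr (Or.inl hx.1))⟩
        · exact ⟨hx.2.1, hx.2.2, Or.inr (Or.inr (Or.inr hx.1))⟩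
      · rintro ⟨h0, h1, (rfl | rfl | hx | hx)⟩ <;> tauto
    -- A's filtered set has the same membership
    set sA : List Int :=
      PySem.Set.ofList
        ((PySem.Set.update (PySem.Set.update (PySem.Set.ofList [0, n - 1]) off) on).filter
          (fun i => decide (0 ≤ i ∧ i < n))) with hsA
    have hmemA : ∀ x : Int, x ∈ sA ↔
        (0 ≤ x ∧ x < n ∧ (x = 0 ∨ x = n - 1 ∨ x ∈ off ∨ x ∈ on)) := by
      intro x
      rw [hsA, PySem.Set.mem_ofList, List.mem_filter, PySem.Set.mem_update, PySem.Set.mem_update,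
        PySem.Set.mem_ofList]
      simp only [List.mem_cons, List.not_mem_nil, or_false, decide_eq_true_eq]
      constructor
      · rintro ⟨hm, h0, h1⟩; exact ⟨h0, h1, by tauto⟩
      · rintro ⟨h0, h1, hm⟩; exact ⟨by tauto, h0, h1⟩
    have hperm : resB.Perm sA := by
      have hnB : resB.Nodup := pw3.imp (fun h => ne_of_lt h)
      have hnA : sA.Nodup := PySem.Set.nodup_ofList _
      rw [List.perm_ext_iff_of_nodup hnB hnA]
      intro x; rw [hmemA x, hmemB x]
    exact PySem.List.sorted_eq_of_perm_of_pairwise_lt _ _ _ hperm pw3
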